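-- pv_equiv track=rewrite | github.com/JKourelis/ipSAE_batch | ipsae_batch/extractors/contacts.py | _group_into_regions
-- ===== SOURCE A (Python) =====
-- from typing import Dict, List, Tuple, Optional
--
-- def _group_into_regions(
--     indices: List[int],
--     gap_threshold: int = 5
-- ) -> List[Tuple[int, int]]:
--     """Group sorted indices into contiguous regions."""
--     if not indices:
--         return []
--
--     regions = []
--     start = indices[0]
--     prev = indices[0]
--
--     for idx in indices[1:]:
--         if idx - prev > gap_threshold:
--             regions.append((start, prev))
--             start = idx
--         prev = idx
--     regions.append((start, prev))
--
--     return regions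
-- ===== SOURCE B (Python) =====
-- def _group_into_regions(indices, gap_threshold=5):
--     """Group sorted indices into contiguous regions."""
--     if not indices:
--         return []
--     pairs = list(zip(indices, indices[1:]))
--     starts = [indices[0]] + [b for a, b in pairs if b - a > gap_threshold]
--     ends = [a for a, b in pairs if b - a > gap_threshold] + [indices[-1]]
--     return list(zip(starts, ends))
-- ===== Notes on version B (the rewrite author's own statement) =====
-- stated objective: alternative
-- what changed: Replaces A's stateful accumulator loop (start/prev registers, flush-on-gap) by a declarative pipeline: zip adjacent pairs, filter the gap breaks, build the starts and ends lists from the break pairs, and zip them together.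
import Mathlib
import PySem

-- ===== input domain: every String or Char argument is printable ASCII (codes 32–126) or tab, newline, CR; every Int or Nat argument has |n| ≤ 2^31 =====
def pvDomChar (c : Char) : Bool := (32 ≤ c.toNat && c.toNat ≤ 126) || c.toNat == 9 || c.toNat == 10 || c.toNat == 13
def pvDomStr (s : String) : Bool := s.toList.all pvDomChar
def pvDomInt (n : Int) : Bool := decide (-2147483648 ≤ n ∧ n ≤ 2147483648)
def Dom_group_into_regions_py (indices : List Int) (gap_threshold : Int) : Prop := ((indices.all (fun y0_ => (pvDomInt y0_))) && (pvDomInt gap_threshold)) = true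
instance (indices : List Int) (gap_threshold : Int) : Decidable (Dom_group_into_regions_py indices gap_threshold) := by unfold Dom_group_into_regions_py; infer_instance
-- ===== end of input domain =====

-- B replaces A's stateful accumulator loop by a zip/filter pipeline over adjacent pairs; alternative decomposition, same O(n) cost.


-- ===== PORT A =====
-- loop body of A: state = (regions, start, prev)
def aStep (gap : Int) (st : List (Int × Int) × Int × Int) (idx : Int) :
    List (Int × Int) × Int × Int :=
  if idx - st.2.2 > gap then (st.1 ++ [(st.2.1, st.2.2)], idx, idx)
  else (st.1, st.2.1, idx)

def group_into_regions_py (indices : List Int) (gap_threshold : Int) : List (Int × Int) :=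
  match indices with
  | [] => []
  | x :: rest =>
    let st := rest.foldl (aStep gap_threshold) ([], x, x)
    st.1 ++ [(st.2.1, st.2.2)]

-- ===== PORT B =====
def group_into_regions_py_alt (indices : List Int) (gap_threshold : Int) : List (Int × Int) :=
  match indices with
  | [] => []
  | x :: rest =>
    let pairs := List.zip indices rest                       -- zip(indices, indices[1:])
    let breaks := pairs.filter (fun p => p.2 - p.1 > gap_threshold)
    let starts := x :: breaks.map (fun p => p.2)             -- [indices[0]] + [b for break pairs]
    let ends := breaks.map (fun p => p.1) ++ [PySem.List.pyGetD indices (-1) 0]  -- + [indices[-1]]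
    List.zip starts ends

-- ===== PRECONDITION & SPEC =====
def Spec_group_into_regions_py (indices : List Int) (gap_threshold : Int) (out : List (Int × Int)) : Prop := out = group_into_regions_py_alt indices gap_threshold
instance (indices : List Int) (gap_threshold : Int) (out : List (Int × Int)) : Decidable (Spec_group_into_regions_py indices gap_threshold out) := by unfold Spec_group_into_regions_py; infer_instance

-- ===== CLAIM (what is proved, stated in full; the proofs are below) =====
def Claim_equal_group_into_regions_py : Prop := ∀ (indices : List Int) (gap_threshold : Int), Dom_group_into_regions_py indices gap_threshold → Spec_group_into_regions_py indices gap_threshold (group_into_regions_py indices gap_threshold)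

-- ===== LEMMAS AND PROOFS =====

-- flatten A's final triple
def aFinish (st : List (Int × Int) × Int × Int) : List (Int × Int) :=
  st.1 ++ [(st.2.1, st.2.2)]

-- Python indices[-1] on a nonempty list ignores a prepended head when the tail is nonempty
theorem pyGetD_neg_one_cons_cons (x y : Int) (t : List Int) :
    PySem.List.pyGetD (x :: y :: t) (-1) 0 = PySem.List.pyGetD (y :: t) (-1) 0 := by
  simp [PySem.List.pyGetD, PySem.List.pyGet?, PySem.List.pyIdx?]
  omega

-- loop invariant: A's fold from state (acc, s, x) over t produces exactly acc ++ B's zip pipeline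
-- built from the adjacent pairs of (x :: t), with s as the first region's start.
theorem main_inv (gap : Int) (t : List Int) :
    ∀ (acc : List (Int × Int)) (s x : Int),
      aFinish (t.foldl (aStep gap) (acc, s, x)) =
        acc ++ List.zip
          (s :: ((List.zip (x :: t) t).filter (fun p => p.2 - p.1 > gap)).map (fun p => p.2))
          (((List.zip (x :: t) t).filter (fun p => p.2 - p.1 > gap)).map (fun p => p.1)
            ++ [PySem.List.pyGetD (x :: t) (-1) 0]) := by
  induction t with
  | nil =>
    intro acc s x
    simp [aFinish, PySem.List.pyGetD, PySem.List.pyGet?, PySem.List.pyIdx?]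
  | cons y t' ih =>
    intro acc s x
    by_cases h : y - x > gap
    · simp only [List.foldl_cons, aStep, h, if_pos]
      rw [ih]
      simp [List.zip, h, pyGetD_neg_one_cons_cons]
    · simp only [List.foldl_cons, aStep, h]
      rw [ih]
      simp [List.zip, h, pyGetD_neg_one_cons_cons]

-- ===== VERDICT (by name: the statement is the Claim_ definition above) =====
theorem group_into_regions_py_spec : Claim_equal_group_into_regions_py := by
  intro indices gap _
  unfold Spec_group_into_regions_py
  cases indices with
  | nil => rfl
  | cons x rest =>
    show aFinish (rest.foldl (aStep gap) ([], x, x)) = _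
    rw [main_inv]
    rfl
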